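-- pv_equiv track=rewrite | github.com/xxxxsars/ait_wb | list/views.py | get_conflict_tasks
-- ===== SOURCE A (Python) =====
-- def get_conflict_tasks(conflict_dict):
--     # get conflict file
--     conflict_files = []
--     for k, files in conflict_dict.items():
--         for f in files:
--             if f in conflict_files:
--                 pass
--             else:
--                 conflict_files.append(f)
--
--     # get confilct task map by conflict file
--     conflict_task = {}
--     for cf in conflict_files:
--         tasks = []
--         for k, files in conflict_dict.items():
--             if cf in files:
--                 tasks.append(k)
--         conflict_task[cf] = tasks
--     return conflict_task
-- ===== SOURCE B (Python) =====
-- def get_conflict_tasks(conflict_dict):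
--     # Single pass: group keys by file, deduplicating files within each key's list.
--     result = {}
--     for k, files in conflict_dict.items():
--         for f in dict.fromkeys(files):
--             result.setdefault(f, []).append(k)
--     return result
-- ===== Notes on version B (the rewrite author's own statement) =====
-- stated objective: faster
-- what changed: A first collects the distinct files and then rescans the whole dict once per distinct file; B makes a single pass over the dict, grouping keys per file with setdefault and deduplicating each value list via dict.fromkeys.
import Mathlib
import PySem

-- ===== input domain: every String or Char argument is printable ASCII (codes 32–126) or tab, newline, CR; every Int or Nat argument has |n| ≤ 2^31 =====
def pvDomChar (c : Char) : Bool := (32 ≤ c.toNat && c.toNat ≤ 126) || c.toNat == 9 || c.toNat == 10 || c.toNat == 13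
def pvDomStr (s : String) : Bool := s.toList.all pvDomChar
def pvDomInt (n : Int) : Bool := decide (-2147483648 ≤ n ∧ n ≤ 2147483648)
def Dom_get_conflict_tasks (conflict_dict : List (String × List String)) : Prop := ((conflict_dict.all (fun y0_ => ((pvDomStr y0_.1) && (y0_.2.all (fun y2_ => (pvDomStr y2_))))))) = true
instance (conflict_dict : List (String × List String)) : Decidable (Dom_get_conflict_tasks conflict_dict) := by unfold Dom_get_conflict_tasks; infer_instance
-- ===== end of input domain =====

-- B replaces A's two-phase quadratic scan (collect distinct files, then rescan the whole dict per file)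
-- by a single pass that groups keys per file with setdefault; objective: faster.

-- ===== PORT A =====
def get_conflict_tasks (conflict_dict : List (String × List String)) : List (String × List String) :=
  -- get conflict file
  let conflict_files : List String :=
    conflict_dict.foldl (fun cfs kv =>
      kv.2.foldl (fun cfs f => if f ∈ cfs then cfs else cfs ++ [f]) cfs) []
  -- get conflict task map by conflict file
  let conflict_task : PySem.Dict String (List String) :=
    conflict_files.foldl (fun ct cf =>
      let tasks : List String :=
        conflict_dict.foldl (fun ts kv => if cf ∈ kv.2 then ts ++ [kv.1] else ts) []
      ct.insert cf tasks) PySem.Dict.empty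
  conflict_task.items

-- ===== PORT B =====
def get_conflict_tasks_alt (conflict_dict : List (String × List String)) : List (String × List String) :=
  (conflict_dict.foldl (fun result kv =>
      (PySem.List.dedup kv.2).foldl (fun result f => result.modify f [] (· ++ [kv.1])) result)
    PySem.Dict.empty).items

-- ===== PRECONDITION & SPEC =====
def Spec_get_conflict_tasks (conflict_dict : List (String × List String)) (out : List (String × List String)) : Prop := out = get_conflict_tasks_alt conflict_dict
instance (conflict_dict : List (String × List String)) (out : List (String × List String)) : Decidable (Spec_get_conflict_tasks conflict_dict out) := by unfold Spec_get_conflict_tasks; infer_instance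

-- ===== CLAIM (what is proved, stated in full; the proofs are below) =====
def Claim_equal_get_conflict_tasks : Prop := ∀ (conflict_dict : List (String × List String)), Dom_get_conflict_tasks conflict_dict → Spec_get_conflict_tasks conflict_dict (get_conflict_tasks conflict_dict)


-- ===== LEMMAS AND PROOFS =====

-- A's phase-1 accumulation of distinct files, generalized over the accumulator.
def pvFiles (L : List (String × List String)) (s : PySem.Set String) : PySem.Set String :=
  L.foldl (fun cfs kv => PySem.Set.update cfs kv.2) s

-- A's inner if-append fold is Set.update.
lemma foldl_ite_append_eq_update (xs : List String) (s : PySem.Set String) :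
    xs.foldl (fun cfs f => if f ∈ cfs then cfs else cfs ++ [f]) s = s.update xs := by
  induction xs generalizing s with
  | nil => rfl
  | cons x xs ih =>
    rw [List.foldl_cons, PySem.Set.update_cons, ← PySem.Set.add_eq_ite]
    exact ih _

lemma filesA_eq (L : List (String × List String)) (s : PySem.Set String) :
    L.foldl (fun cfs kv =>
      kv.2.foldl (fun cfs f => if f ∈ cfs then cfs else cfs ++ [f]) cfs) s = pvFiles L s := by
  induction L generalizing s with
  | nil => rfl
  | cons kv L ih =>
    rw [List.foldl_cons, foldl_ite_append_eq_update]
    exact ih _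

lemma update_dedup (s : PySem.Set String) (xs : List String) :
    s.update (PySem.List.dedup xs) = s.update xs := by
  rw [PySem.List.dedup_eq_ofList, PySem.Set.update_eq_append_filter,
      PySem.Set.update_eq_append_filter, PySem.Set.ofList_ofList]

-- one B-step: keys become updated by the pair's file list
lemma stepB_keys (fs : List String) (k : String) (d : PySem.Dict String (List String)) :
    ((PySem.List.dedup fs).foldl (fun r f => r.modify f [] (· ++ [k])) d).keys
      = PySem.Set.update d.keys fs := by
  rw [PySem.Dict.keys_foldl_modify (PySem.List.dedup fs) [] (fun _ _ v => v ++ [k]) d,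
      update_dedup]

-- a dedup list filtered for one element
lemma filter_dedup_eq (fs : List String) (c : String) :
    (PySem.List.dedup fs).filter (fun f => f == c) = if c ∈ fs then [c] else [] := by
  rw [List.filter_beq]
  by_cases hc : c ∈ fs
  · rw [if_pos hc, List.count_eq_one_of_mem (PySem.List.nodup_dedup fs)
      ((PySem.List.mem_dedup fs c).mpr hc), List.replicate_one]
  · rw [if_neg hc, List.count_eq_zero_of_not_mem, List.replicate_zero]
    exact fun h => hc ((PySem.List.mem_dedup fs c).mp h)

-- one B-step: each value gains k iff the file occurs in the pair's list
lemma stepB_getD (fs : List String) (k : String) (d : PySem.Dict String (List String)) (c : String) :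
    ((PySem.List.dedup fs).foldl (fun r f => r.modify f [] (· ++ [k])) d).getD c []
      = d.getD c [] ++ (if c ∈ fs then [k] else []) := by
  have h1 : ((PySem.List.dedup fs).foldl (fun r f => r.modify f [] (· ++ [k])) d)
      = (((PySem.List.dedup fs).map (fun f => (f, k))).foldl
          (fun r p => r.modify p.1 [] (· ++ [p.2])) d) := by
    rw [List.foldl_map]
  rw [h1, PySem.Dict.getD_foldl_modify_append, List.filter_map]
  have h2 : ((fun p => p.1 == c) ∘ (fun f => ((f : String), k))) = fun f => f == c := rfl
  rw [h2, filter_dedup_eq]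
  by_cases hc : c ∈ fs
  · rw [if_pos hc, if_pos hc]; rfl
  · rw [if_neg hc, if_neg hc]; rfl

-- B's dict over the whole input: keys
lemma B_keys (L : List (String × List String)) (d : PySem.Dict String (List String)) :
    (L.foldl (fun r kv => (PySem.List.dedup kv.2).foldl (fun r f => r.modify f [] (· ++ [kv.1])) r) d).keys
      = pvFiles L d.keys := by
  induction L generalizing d with
  | nil => rfl
  | cons kv L ih =>
    rw [List.foldl_cons, ih, stepB_keys]
    rfl

-- A's per-file task list, generalized over the accumulator.
lemma tasks_acc (L : List (String × List String)) (c : String) (ts0 : List String) :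
    L.foldl (fun ts kv => if c ∈ kv.2 then ts ++ [kv.1] else ts) ts0
      = ts0 ++ L.foldl (fun ts kv => if c ∈ kv.2 then ts ++ [kv.1] else ts) [] := by
  induction L generalizing ts0 with
  | nil => simp
  | cons kv L ih =>
    rw [List.foldl_cons, List.foldl_cons, ih (if c ∈ kv.2 then ts0 ++ [kv.1] else ts0),
        ih (if c ∈ kv.2 then [] ++ [kv.1] else [])]
    split_ifs <;> simp

-- B's dict over the whole input: values
lemma B_getD (L : List (String × List String)) (d : PySem.Dict String (List String)) (c : String) :
    (L.foldl (fun r kv => (PySem.List.dedup kv.2).foldl (fun r f => r.modify f [] (· ++ [kv.1])) r) d).getD c []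
      = d.getD c [] ++ L.foldl (fun ts kv => if c ∈ kv.2 then ts ++ [kv.1] else ts) [] := by
  induction L generalizing d with
  | nil => simp
  | cons kv L ih =>
    rw [List.foldl_cons, ih, stepB_getD, List.foldl_cons,
        tasks_acc L c (if c ∈ kv.2 then [] ++ [kv.1] else [])]
    by_cases hc : c ∈ kv.2
    · rw [if_pos hc, if_pos hc]; simp
    · rw [if_neg hc, if_neg hc]; simp

lemma pvFiles_nodup (L : List (String × List String)) (s : PySem.Set String) (h : s.Nodup) :
    (pvFiles L s).Nodup := by
  induction L generalizing s with
  | nil => exact h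
  | cons kv L ih => exact ih _ (PySem.Set.nodup_update s kv.2 h)

-- ===== VERDICT (by name: the statement is the Claim_ definition above) =====
theorem get_conflict_tasks_spec : Claim_equal_get_conflict_tasks := by
  intro L _
  show get_conflict_tasks L = get_conflict_tasks_alt L
  unfold get_conflict_tasks get_conflict_tasks_alt
  dsimp only
  rw [filesA_eq]
  have hnd : (pvFiles L ([] : PySem.Set String)).Nodup := pvFiles_nodup L [] List.nodup_nil
  have hk : (L.foldl (fun r kv => (PySem.List.dedup kv.2).foldl
      (fun r f => r.modify f [] (· ++ [kv.1])) r) PySem.Dict.empty).keys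
      = pvFiles L [] := by
    rw [B_keys]; rfl
  rw [PySem.Dict.items_foldl_insert_fresh (pvFiles L []) (fun a => a)
        (fun cf => L.foldl (fun ts kv => if cf ∈ kv.2 then ts ++ [kv.1] else ts) [])
        PySem.Dict.empty (fun a _ => PySem.Dict.contains_empty a) (by simpa using hnd),
      PySem.Dict.items_eq_map_keys (L.foldl (fun r kv => (PySem.List.dedup kv.2).foldl
        (fun r f => r.modify f [] (· ++ [kv.1])) r) PySem.Dict.empty) (by rw [hk]; exact hnd) [],
      hk]
  have he : (PySem.Dict.empty : PySem.Dict String (List String)).items = [] := rfl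
  rw [he, List.nil_append]
  exact List.map_congr_left (fun c _ => by rw [B_getD]; simp [PySem.Dict.getD_empty])
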